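-- pv_equiv track=rewrite | github.com/Soxna-Aminah/PyE_Fall_Amy | fonc.py | classe
-- ===== SOURCE A (Python) =====
-- def classe(chaine):
--     l1=["3","4","5","6"]
--     l2=["A","B"]
--     nclass=None
--     for i in l1:
--         for j in l2:
--             if i in chaine and j in chaine:
--                 nclass=i+"iéme"+j
--     return nclass
-- ===== SOURCE B (Python) =====
-- def classe(chaine):
--     digit = None
--     for i in ["3", "4", "5", "6"]:
--         if i in chaine:
--             digit = i
--     letter = None
--     for j in ["A", "B"]:
--         if j in chaine:
--             letter = j
--     if digit is not None and letter is not None: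
--         return digit + "iéme" + letter
--     return None
-- ===== Notes on version B (the rewrite author's own statement) =====
-- stated objective: simpler
-- what changed: Replaces the nested digit x letter loop (8 coupled substring checks) with two independent single scans that record the last digit and last letter present, combined once at the end.
import Mathlib
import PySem

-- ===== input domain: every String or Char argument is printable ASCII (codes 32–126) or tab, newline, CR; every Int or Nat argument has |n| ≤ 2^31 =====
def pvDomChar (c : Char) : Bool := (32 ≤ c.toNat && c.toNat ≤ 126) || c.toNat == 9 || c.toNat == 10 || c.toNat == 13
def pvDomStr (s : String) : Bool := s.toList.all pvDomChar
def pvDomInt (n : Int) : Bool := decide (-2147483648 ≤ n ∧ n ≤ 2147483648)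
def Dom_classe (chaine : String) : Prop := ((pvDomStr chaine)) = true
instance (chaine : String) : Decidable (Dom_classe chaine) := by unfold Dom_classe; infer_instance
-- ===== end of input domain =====

-- ===== PORT A =====
-- B records the last digit and last letter present in two independent scans, then combines once (simpler decomposition).
def classe (chaine : String) : Option String :=
  let l1 := ["3", "4", "5", "6"]
  let l2 := ["A", "B"]
  l1.foldl (fun nclass i =>
    l2.foldl (fun nclass j =>
      if PySem.Str.isIn i chaine && PySem.Str.isIn j chaine then some (i ++ "iéme" ++ j)
      else nclass) nclass) none

-- ===== PORT B =====
def classe_alt (chaine : String) : Option String :=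
  let digit := ["3", "4", "5", "6"].foldl (fun d i => if PySem.Str.isIn i chaine then some i else d) none
  let letter := ["A", "B"].foldl (fun l j => if PySem.Str.isIn j chaine then some j else l) none
  match digit, letter with
  | some i, some j => some (i ++ "iéme" ++ j)
  | _, _ => none

-- ===== PRECONDITION & SPEC =====
def Spec_classe (chaine : String) (out : Option String) : Prop := out = classe_alt chaine
instance (chaine : String) (out : Option String) : Decidable (Spec_classe chaine out) := by unfold Spec_classe; infer_instance

-- ===== CLAIM (what is proved, stated in full; the proofs are below) =====
def Claim_equal_classe : Prop := ∀ (chaine : String), Dom_classe chaine → Spec_classe chaine (classe chaine)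

-- ===== LEMMAS AND PROOFS =====

-- ===== VERDICT (by name: the statement is the Claim_ definition above) =====
theorem classe_spec : Claim_equal_classe := by
  intro chaine _
  unfold Spec_classe classe classe_alt
  cases h3 : PySem.Chars.isIn ['3'] chaine.toList <;>
  cases h4 : PySem.Chars.isIn ['4'] chaine.toList <;>
  cases h5 : PySem.Chars.isIn ['5'] chaine.toList <;>
  cases h6 : PySem.Chars.isIn ['6'] chaine.toList <;>
  cases hA : PySem.Chars.isIn ['A'] chaine.toList <;>
  cases hB : PySem.Chars.isIn ['B'] chaine.toList <;>
  simp [h3, h4, h5, h6, hA, hB]
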